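-- pv_equiv track=rewrite | github.com/AiLang-Author/AiLang | ailang/cobol_frontend/test scripts/verify_methods.py | create_reverse_index
-- ===== SOURCE A (Python) =====
-- from typing import Dict, Set, List, Tuple
--
-- def create_reverse_index(split_methods: Dict[str, Dict[str, Tuple[int, str]]]) -> Dict[str, str]:
--     """
--     Create a reverse index: method_name -> filename
--     """
--     reverse = {}
--     for filename, methods in split_methods.items():
--         for method_name in methods.keys():
--             if method_name in reverse:
--                 # Duplicate method name across files
--                 reverse[method_name] = f"DUPLICATE: {reverse[method_name]}, {filename}"
--             else:
--                 reverse[method_name] = filename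
--
--     return reverse
-- ===== SOURCE B (Python) =====
-- def create_reverse_index(split_methods):
--     """
--     Create a reverse index: method_name -> filename
--     (two passes: group filenames per method, then render each group)
--     """
--     groups = {}
--     for filename, methods in split_methods.items():
--         for method_name in methods:
--             groups.setdefault(method_name, []).append(filename)
--     out = {}
--     for method_name, fns in groups.items():
--         label = fns[0]
--         for fn in fns[1:]:
--             label = f"DUPLICATE: {label}, {fn}"
--         out[method_name] = label
--     return out
-- ===== Notes on version B (the rewrite author's own statement) =====
-- stated objective: alternative
-- what changed: Replaces the single running-string update inside the scan by two passes: first group filenames per method name into lists in a dict, then render each group by folding its tail into the nested DUPLICATE string.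
import Mathlib
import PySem

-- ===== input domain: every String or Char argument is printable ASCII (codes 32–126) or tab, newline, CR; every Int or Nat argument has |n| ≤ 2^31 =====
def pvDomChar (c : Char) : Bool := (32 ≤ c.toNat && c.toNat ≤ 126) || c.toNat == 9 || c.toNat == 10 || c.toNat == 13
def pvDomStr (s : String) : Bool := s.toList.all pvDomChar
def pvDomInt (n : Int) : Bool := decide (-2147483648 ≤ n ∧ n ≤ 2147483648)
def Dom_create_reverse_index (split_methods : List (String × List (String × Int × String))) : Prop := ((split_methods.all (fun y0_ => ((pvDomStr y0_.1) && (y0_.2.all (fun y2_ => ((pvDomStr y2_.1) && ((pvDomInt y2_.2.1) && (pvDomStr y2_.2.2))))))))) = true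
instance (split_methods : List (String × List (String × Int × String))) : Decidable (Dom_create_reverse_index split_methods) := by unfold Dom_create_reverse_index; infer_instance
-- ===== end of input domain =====

-- B replaces A's in-scan running-string update by a group-then-render two-pass decomposition; same return value (alternative, not faster).

-- ===== PORT A =====
-- A: one scan; reverse[m] is either the filename or a nested "DUPLICATE: …" string updated in place.
-- reverse[method_name] under the contains-guard is ported as getD with "" (never the default on that branch).
def create_reverse_index (split_methods : List (String × List (String × Int × String))) : List (String × String) :=
  (split_methods.foldl (fun reverse fm =>
      fm.2.foldl (fun reverse mrec =>
          if reverse.contains mrec.1 then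
            reverse.insert mrec.1 ("DUPLICATE: " ++ reverse.getD mrec.1 "" ++ ", " ++ fm.1)
          else
            reverse.insert mrec.1 fm.1)
        reverse)
    (PySem.Dict.empty : PySem.Dict String String)).items

-- ===== PORT B =====
-- render one group: label = fns[0], then fold fns[1:]; Python's fns[0] never sees [] (groups only hold appended
-- filenames), so the [] case returns "" here.
def pvRenderGroup (fns : List String) : String :=
  match fns with
  | [] => ""
  | label :: rest => rest.foldl (fun label fn => "DUPLICATE: " ++ label ++ ", " ++ fn) label

def create_reverse_index_alt (split_methods : List (String × List (String × Int × String))) : List (String × String) :=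
  let groups := split_methods.foldl (fun groups fm =>
      fm.2.foldl (fun groups mrec => groups.modify mrec.1 [] (· ++ [fm.1])) groups)
    (PySem.Dict.empty : PySem.Dict String (List String))
  groups.items.map (fun p => (p.1, pvRenderGroup p.2))

-- ===== PRECONDITION & SPEC =====
def Spec_create_reverse_index (split_methods : List (String × List (String × Int × String))) (out : List (String × String)) : Prop := out = create_reverse_index_alt split_methods
instance (split_methods : List (String × List (String × Int × String))) (out : List (String × String)) : Decidable (Spec_create_reverse_index split_methods out) := by unfold Spec_create_reverse_index; infer_instance

-- ===== CLAIM (what is proved, stated in full; the proofs are below) =====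
def Claim_equal_create_reverse_index : Prop := ∀ (split_methods : List (String × List (String × Int × String))), Dom_create_reverse_index split_methods → Spec_create_reverse_index split_methods (create_reverse_index split_methods)

-- ===== LEMMAS AND PROOFS =====

-- A's reverse dict viewed as B's groups dict with every group rendered
def pvMapRender (g : PySem.Dict String (List String)) : PySem.Dict String String :=
  PySem.Dict.mk (g.items.map (fun p => (p.1, pvRenderGroup p.2)))

theorem pvRender_append (fns : List String) (hf : fns ≠ []) (fn : String) :
    pvRenderGroup (fns ++ [fn]) = "DUPLICATE: " ++ pvRenderGroup fns ++ ", " ++ fn := by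
  cases fns with
  | nil => exact absurd rfl hf
  | cons a l => simp [pvRenderGroup, List.foldl_append]

theorem pvMapRender_keys (g : PySem.Dict String (List String)) :
    (pvMapRender g).keys = g.keys := by
  simp [pvMapRender, PySem.Dict.keys]

theorem pvMapRender_contains (g : PySem.Dict String (List String)) (m : String) :
    (pvMapRender g).contains m = g.contains m := by
  rw [PySem.Dict.contains_eq_decide_mem_keys, PySem.Dict.contains_eq_decide_mem_keys,
    pvMapRender_keys]

-- one (method_name, filename) step: A's conditional insert on the rendered dict = render after B's append
theorem pvStep_comm (g : PySem.Dict String (List String)) (hnd : g.keys.Nodup)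
    (hne : ∀ p ∈ g.items, p.2 ≠ []) (m fn : String) :
    (if (pvMapRender g).contains m then
        (pvMapRender g).insert m ("DUPLICATE: " ++ (pvMapRender g).getD m "" ++ ", " ++ fn)
      else (pvMapRender g).insert m fn)
      = pvMapRender (g.modify m [] (· ++ [fn])) := by
  have hmod : g.modify m [] (· ++ [fn]) = g.insert m (g.getD m [] ++ [fn]) := rfl
  rw [pvMapRender_contains]
  by_cases hc : g.contains m = true
  · -- key present: both sides rewrite the value at m in place
    simp only [hc, if_true]
    obtain ⟨fns, hget⟩ : ∃ fns, g.get? m = some fns := by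
      have := PySem.Dict.contains_eq_isSome_get? g m
      rw [hc] at this
      exact Option.isSome_iff_exists.mp this.symm
    have hmem : (m, fns) ∈ g.items := PySem.Dict.mem_items_of_get?_eq_some g hget
    have hfne : fns ≠ [] := hne _ hmem
    have hgetD : g.getD m [] = fns := PySem.Dict.getD_of_get?_eq_some g [] hget
    have hgetDr : (pvMapRender g).getD m "" = pvRenderGroup fns := by
      have hmemr : (m, pvRenderGroup fns) ∈ (pvMapRender g).items := by
        simp only [pvMapRender]
        exact List.mem_map.mpr ⟨(m, fns), hmem, rfl⟩
      have hndr : (pvMapRender g).keys.Nodup := by rw [pvMapRender_keys]; exact hnd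
      exact PySem.Dict.getD_of_mem_items _ hmemr hndr ""
    have hcr : (pvMapRender g).contains m = true := by rw [pvMapRender_contains]; exact hc
    rw [hgetDr, ← pvRender_append fns hfne fn, hmod, hgetD]
    apply PySem.Dict.ext
    rw [PySem.Dict.items_insert_of_contains _ _ hcr,
      pvMapRender, pvMapRender, PySem.Dict.items_insert_of_contains _ _ hc]
    simp only [List.map_map]
    apply List.map_congr_left
    intro p hp
    by_cases hpm : p.1 = m
    · simp [hpm]
    · simp [hpm]
  · -- new key: both sides append (m, fn) / (m, [fn]) at the end
    have hc' : g.contains m = false := by simpa using hc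
    have hcr : (pvMapRender g).contains m = false := by rw [pvMapRender_contains]; exact hc'
    simp only [hc', if_false, Bool.false_eq_true]
    have hgetD : g.getD m [] = [] := PySem.Dict.getD_of_not_contains g [] hc'
    apply PySem.Dict.ext
    rw [hmod, hgetD, PySem.Dict.items_insert_of_not_contains _ _ hcr,
      pvMapRender, pvMapRender, PySem.Dict.items_insert_of_not_contains _ _ hc']
    simp [pvRenderGroup]

theorem pvStep_inv (g : PySem.Dict String (List String)) (hnd : g.keys.Nodup)
    (hne : ∀ p ∈ g.items, p.2 ≠ []) (m fn : String) :
    (g.modify m [] (· ++ [fn])).keys.Nodup ∧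
      ∀ p ∈ (g.modify m [] (· ++ [fn])).items, p.2 ≠ [] := by
  have hmod : g.modify m [] (· ++ [fn]) = g.insert m (g.getD m [] ++ [fn]) := rfl
  rw [hmod]
  refine ⟨PySem.Dict.nodup_keys_insert _ _ _ hnd, ?_⟩
  intro p hp
  rcases (PySem.Dict.mem_items_insert _ _ _ _).mp hp with h | h
  · subst h; simp
  · exact hne _ h.1

-- inner loop over one file's methods
theorem pvInner_comm (fnm : String) (ms : List (String × Int × String))
    (g : PySem.Dict String (List String)) (hnd : g.keys.Nodup)
    (hne : ∀ p ∈ g.items, p.2 ≠ []) :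
    (ms.foldl (fun reverse mrec =>
        if reverse.contains mrec.1 then
          reverse.insert mrec.1 ("DUPLICATE: " ++ reverse.getD mrec.1 "" ++ ", " ++ fnm)
        else reverse.insert mrec.1 fnm) (pvMapRender g)
      = pvMapRender (ms.foldl (fun groups mrec => groups.modify mrec.1 [] (· ++ [fnm])) g))
    ∧ (ms.foldl (fun groups mrec => groups.modify mrec.1 [] (· ++ [fnm])) g).keys.Nodup
    ∧ ∀ p ∈ (ms.foldl (fun groups mrec => groups.modify mrec.1 [] (· ++ [fnm])) g).items, p.2 ≠ [] := by
  induction ms generalizing g with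
  | nil => exact ⟨rfl, hnd, hne⟩
  | cons mrec rest ih =>
    obtain ⟨hnd', hne'⟩ := pvStep_inv g hnd hne mrec.1 fnm
    have hstep := pvStep_comm g hnd hne mrec.1 fnm
    simp only [List.foldl_cons, hstep]
    exact ih _ hnd' hne'

-- outer loop over the files
theorem pvOuter_comm (sm : List (String × List (String × Int × String)))
    (g : PySem.Dict String (List String)) (hnd : g.keys.Nodup)
    (hne : ∀ p ∈ g.items, p.2 ≠ []) :
    (sm.foldl (fun reverse fm =>
        fm.2.foldl (fun reverse mrec =>
          if reverse.contains mrec.1 then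
            reverse.insert mrec.1 ("DUPLICATE: " ++ reverse.getD mrec.1 "" ++ ", " ++ fm.1)
          else reverse.insert mrec.1 fm.1) reverse) (pvMapRender g)
      = pvMapRender (sm.foldl (fun groups fm =>
          fm.2.foldl (fun groups mrec => groups.modify mrec.1 [] (· ++ [fm.1])) groups) g)) := by
  induction sm generalizing g with
  | nil => rfl
  | cons fm rest ih =>
    obtain ⟨heq, hnd', hne'⟩ := pvInner_comm fm.1 fm.2 g hnd hne
    simp only [List.foldl_cons, heq]
    exact ih _ hnd' hne'

-- ===== VERDICT (by name: the statement is the Claim_ definition above) =====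
theorem create_reverse_index_spec : Claim_equal_create_reverse_index := by
  intro sm _
  unfold Spec_create_reverse_index create_reverse_index create_reverse_index_alt
  have hempty : (PySem.Dict.empty : PySem.Dict String String)
      = pvMapRender (PySem.Dict.empty : PySem.Dict String (List String)) := rfl
  rw [hempty, pvOuter_comm sm PySem.Dict.empty (by simp) (by simp [PySem.Dict.empty])]
  rfl
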